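-- pv_equiv track=rewrite | github.com/117ami/leetcode | python_solutions/1487.making-file-names-unique.py | getFolderNames
-- ===== SOURCE A (Python) =====
-- from collections import Counter, defaultdict, OrderedDict, deque
-- from typing import List
--
-- def getFolderNames(names: List[str]) -> List[str]:
--     cc = defaultdict(int)
--     ans = []
--     for n in names:
--         if n not in cc:
--             ans.append(n)
--             cc[n] += 1
--         else:
--             uid = cc[n]
--             x = n + f"({uid})"
--             while x in cc:
--                 uid += 1
--                 x = n + f"({uid})"
--             ans.append(x)
--             cc[x] = 1
--             cc[n] = uid + 1
--
--     return ans
-- ===== SOURCE B (Python) =====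
-- from typing import List
--
-- def getFolderNames(names: List[str]) -> List[str]:
--     used = set()
--     ans = []
--     for n in names:
--         if n not in used:
--             ans.append(n)
--             used.add(n)
--         else:
--             k = 1
--             while f"{n}({k})" in used:
--                 k += 1
--             x = f"{n}({k})"
--             ans.append(x)
--             used.add(x)
--     return ans
-- ===== Notes on version B (the rewrite author's own statement) =====
-- stated objective: simpler
-- what changed: B replaces A's per-name jump-ahead counter dictionary (which memoises the next suffix to try and stores counters for derived names) by a plain set of used names, rescanning candidate suffixes from k=1 on each collision.
import Mathlib
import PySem

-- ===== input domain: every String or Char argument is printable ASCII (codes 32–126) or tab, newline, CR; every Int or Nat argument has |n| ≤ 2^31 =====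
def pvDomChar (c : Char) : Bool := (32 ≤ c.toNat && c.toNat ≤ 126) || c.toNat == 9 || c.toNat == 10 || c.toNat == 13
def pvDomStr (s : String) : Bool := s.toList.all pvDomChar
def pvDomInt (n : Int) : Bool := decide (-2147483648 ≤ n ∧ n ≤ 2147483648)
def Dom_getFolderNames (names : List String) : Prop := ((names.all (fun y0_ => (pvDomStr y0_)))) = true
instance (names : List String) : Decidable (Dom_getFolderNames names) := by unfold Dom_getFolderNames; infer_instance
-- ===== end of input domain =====

-- B replaces A's per-name jump-ahead counter dictionary by a plain set of used names,
-- rescanning candidate suffixes from k = 1 on each collision (objective: simpler).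

-- n + f"({uid})" (shared by both ports; it is the same f-string in Source A and Source B)
def pvCand (nm : String) (k : Int) : String := nm ++ "(" ++ PySem.Int.toStr k ++ ")"

-- ===== PORT A =====
-- 'while x in cc: uid += 1; x = n + f"({uid})"'; fuel = len(cc)+1 is a totality guard only
-- (within len(cc)+1 candidates one is free, so the guard never fires on the value A computes).
def pvALoop (cc : PySem.Dict String Int) (nm : String) : Int → String → Nat → Int × String
  | uid, x, 0 => (uid, x)
  | uid, x, fuel+1 =>
    if cc.contains x = true then pvALoop cc nm (uid + 1) (pvCand nm (uid + 1)) fuel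
    else (uid, x)

def pvAStep (st : PySem.Dict String Int × List String) (nm : String) :
    PySem.Dict String Int × List String :=
  let cc := st.1
  let ans := st.2
  if cc.contains nm = false then
    (cc.insert nm (cc.getD nm 0 + 1), ans ++ [nm])       -- cc[n] += 1 on defaultdict(int)
  else
    let uid0 := cc.getD nm 0                             -- uid = cc[n]
    let r := pvALoop cc nm uid0 (pvCand nm uid0) (cc.keys.length + 1)
    ((cc.insert r.2 1).insert nm (r.1 + 1), ans ++ [r.2]) -- cc[x] = 1; cc[n] = uid + 1

def getFolderNames (names : List String) : List String :=
  (names.foldl pvAStep (PySem.Dict.empty, [])).2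

-- ===== PORT B =====
-- 'k = 1; while f"{n}({k})" in used: k += 1'; fuel = len(used)+1 is a totality guard only.
def pvBLoop (used : PySem.Set String) (nm : String) : Int → Nat → Int
  | k, 0 => k
  | k, fuel+1 =>
    if used.contains (pvCand nm k) = true then pvBLoop used nm (k + 1) fuel
    else k

def pvBStep (st : PySem.Set String × List String) (nm : String) :
    PySem.Set String × List String :=
  let used := st.1
  let ans := st.2
  if used.contains nm = false then
    (used.add nm, ans ++ [nm])
  else
    let x := pvCand nm (pvBLoop used nm 1 (used.length + 1))
    (used.add x, ans ++ [x])

def getFolderNames_alt (names : List String) : List String :=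
  (names.foldl pvBStep (PySem.Set.empty, [])).2

-- ===== PRECONDITION & SPEC =====
def Spec_getFolderNames (names : List String) (out : List String) : Prop := out = getFolderNames_alt names
instance (names : List String) (out : List String) : Decidable (Spec_getFolderNames names out) := by unfold Spec_getFolderNames; infer_instance

-- ===== CLAIM (what is proved, stated in full; the proofs are below) =====
def Claim_equal_getFolderNames : Prop := ∀ (names : List String), Dom_getFolderNames names → Spec_getFolderNames names (getFolderNames names)

-- ===== LEMMAS AND PROOFS =====

-- decimal value of a digit string; left inverse of Nat.toDigits 10
def pvVal (cs : List Char) : Nat := cs.foldl (fun a c => 10 * a + (c.toNat - 48)) 0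

lemma pvVal_append (xs : List Char) (c : Char) :
    pvVal (xs ++ [c]) = 10 * pvVal xs + (c.toNat - 48) := by
  simp [pvVal, List.foldl_append]

lemma pvDigitChar_val (d : Nat) (h : d < 10) : (Nat.digitChar d).toNat - 48 = d := by
  interval_cases d <;> rfl

lemma pvCore_acc (f : Nat) : ∀ (n : Nat) (ds : List Char),
    Nat.toDigitsCore 10 f n ds = Nat.toDigitsCore 10 f n [] ++ ds := by
  induction f with
  | zero => intro n ds; simp [Nat.toDigitsCore]
  | succ f ih =>
    intro n ds
    simp only [Nat.toDigitsCore]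
    by_cases h : n / 10 = 0
    · simp [h]
    · simp only [h, if_false]
      rw [ih (n / 10) [Nat.digitChar (n % 10)], ih (n / 10) (Nat.digitChar (n % 10) :: ds)]
      simp

lemma pvVal_core (f : Nat) : ∀ n : Nat, n < 10 ^ f → pvVal (Nat.toDigitsCore 10 f n []) = n := by
  induction f with
  | zero => intro n hn; interval_cases n; simp [Nat.toDigitsCore, pvVal]
  | succ f ih =>
    intro n hn
    simp only [Nat.toDigitsCore]
    by_cases h : n / 10 = 0
    · have h10 : n < 10 := by omega
      simp only [h, if_true]
      have h2 : n % 10 = n := by omega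
      have h3 := pvDigitChar_val n h10
      simp [pvVal, h2, h3]
    · simp only [h, if_false]
      rw [pvCore_acc, pvVal_append, pvDigitChar_val (n % 10) (by omega)]
      have hdiv : n / 10 < 10 ^ f := by
        rw [Nat.div_lt_iff_lt_mul (by norm_num)]
        calc n < 10 ^ (f + 1) := hn
        _ = 10 ^ f * 10 := by ring
      rw [ih (n / 10) hdiv]
      omega

lemma pvToDigits_val (n : Nat) : pvVal (Nat.toDigits 10 n) = n := by
  have h : n < 10 ^ (n + 1) := by
    calc n < 10 ^ n := Nat.lt_pow_self (by norm_num)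
    _ ≤ 10 ^ (n + 1) := Nat.pow_le_pow_right (by norm_num) (Nat.le_succ n)
  simpa [Nat.toDigits] using pvVal_core (n + 1) n h

lemma pvCand_inj (nm : String) (j j' : Int) (hj : 1 ≤ j) (hj' : 1 ≤ j')
    (h : pvCand nm j = pvCand nm j') : j = j' := by
  have h2 : nm.toList ++ ('(' :: (PySem.Int.toChars j ++ [')'])) =
      nm.toList ++ ('(' :: (PySem.Int.toChars j' ++ [')'])) := by
    have h1 := congrArg String.toList h
    simpa [pvCand, PySem.Int.toList_toStr] using h1
  have h3 := List.append_cancel_left h2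
  have h4 : PySem.Int.toChars j ++ [')'] = PySem.Int.toChars j' ++ [')'] := by
    injection h3
  have h5 := List.append_cancel_right h4
  have e1 : PySem.Int.toChars j = Nat.toDigits 10 j.toNat := by
    rw [PySem.Int.toChars, if_neg (by omega)]
  have e2 : PySem.Int.toChars j' = Nat.toDigits 10 j'.toNat := by
    rw [PySem.Int.toChars, if_neg (by omega)]
  have h6 : j.toNat = j'.toNat := by
    have := congrArg pvVal (e1 ▸ e2 ▸ h5)
    simpa [pvToDigits_val] using this
  omega

-- pigeonhole: among keys.length+1 successive candidates one is not a key
lemma pvExists_free (keys : List String) (nm : String) (start : Int)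
    (h1 : 1 ≤ start) :
    ∃ t : Nat, t < keys.length + 1 ∧ pvCand nm (start + t) ∉ keys := by
  by_contra hcon
  push_neg at hcon
  set L := (List.range (keys.length + 1)).map (fun t : Nat => pvCand nm (start + (t : Int))) with hLdef
  have hL : L.Nodup := by
    rw [hLdef]
    refine List.Nodup.map_on ?_ List.nodup_range
    intro a _ b _ hab
    have := pvCand_inj nm (start + (a : Int)) (start + (b : Int)) (by omega) (by omega) hab
    omega
  have hsub : L ⊆ keys := by
    intro x hx
    simp only [hLdef, List.mem_map, List.mem_range] at hx
    obtain ⟨t, ht, rfl⟩ := hx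
    exact hcon t ht
  have hcard : L.length ≤ keys.length := by
    have e1 : L.toFinset.card = L.length := List.toFinset_card_of_nodup hL
    have e2 : keys.toFinset.card ≤ keys.length := List.toFinset_card_le keys
    have e3 : L.toFinset ⊆ keys.toFinset := by
      intro x hx
      rw [List.mem_toFinset] at hx ⊢
      exact hsub hx
    have := Finset.card_le_card e3
    omega
  rw [hLdef] at hcard
  simp only [List.length_map, List.length_range] at hcard
  omega

-- A's inner while loop: result is the first free index ≥ start
lemma pvALoop_spec (cc : PySem.Dict String Int) (nm : String) :
    ∀ (fuel : Nat) (start : Int), 1 ≤ start →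
    (∃ t : Nat, t < fuel ∧ pvCand nm (start + t) ∉ cc.keys) →
    ∃ r : Int, pvALoop cc nm start (pvCand nm start) fuel = (r, pvCand nm r) ∧
      start ≤ r ∧ (∀ j : Int, start ≤ j → j < r → pvCand nm j ∈ cc.keys) ∧
      pvCand nm r ∉ cc.keys := by
  intro fuel
  induction fuel with
  | zero => intro start _ hex; obtain ⟨t, ht, _⟩ := hex; omega
  | succ fuel ih =>
    intro start hstart hex
    by_cases hc : cc.contains (pvCand nm start) = true
    · have hmem : pvCand nm start ∈ cc.keys := (PySem.Dict.contains_iff_mem_keys _ _).1 hc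
      obtain ⟨t, ht, hfree⟩ := hex
      have ht0 : t ≠ 0 := by
        intro h0; subst h0; simp at hfree; exact hfree hmem
      have hex' : ∃ t' : Nat, t' < fuel ∧ pvCand nm ((start + 1) + t') ∉ cc.keys := by
        refine ⟨t - 1, by omega, ?_⟩
        have : (start + 1) + ((t - 1 : Nat) : Int) = start + t := by omega
        rw [this]; exact hfree
      obtain ⟨r, heq, hle, hocc, hfr⟩ := ih (start + 1) (by omega) hex'
      refine ⟨r, ?_, by omega, ?_, hfr⟩
      · simp only [pvALoop, hc, if_true]; exact heq
      · intro j hj1 hj2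
        by_cases hj : j = start
        · subst hj; exact hmem
        · exact hocc j (by omega) hj2
    · refine ⟨start, ?_, le_refl _, by omega, ?_⟩
      · simp only [pvALoop]; simp at hc; simp [hc]
      · intro hmem
        exact hc ((PySem.Dict.contains_iff_mem_keys _ _).2 hmem)

-- B's inner while loop: result is the first free index ≥ start
lemma pvBLoop_spec (used : PySem.Set String) (nm : String) :
    ∀ (fuel : Nat) (start : Int), 1 ≤ start →
    (∃ t : Nat, t < fuel ∧ pvCand nm (start + t) ∉ used) →
    ∃ r : Int, pvBLoop used nm start fuel = r ∧
      start ≤ r ∧ (∀ j : Int, start ≤ j → j < r → pvCand nm j ∈ used) ∧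
      pvCand nm r ∉ used := by
  intro fuel
  induction fuel with
  | zero => intro start _ hex; obtain ⟨t, ht, _⟩ := hex; omega
  | succ fuel ih =>
    intro start hstart hex
    by_cases hc : used.contains (pvCand nm start) = true
    · have hmem : pvCand nm start ∈ used := by
        simpa [PySem.Set.contains] using hc
      obtain ⟨t, ht, hfree⟩ := hex
      have ht0 : t ≠ 0 := by
        intro h0; subst h0; simp at hfree; exact hfree hmem
      have hex' : ∃ t' : Nat, t' < fuel ∧ pvCand nm ((start + 1) + t') ∉ used := by
        refine ⟨t - 1, by omega, ?_⟩
        have : (start + 1) + ((t - 1 : Nat) : Int) = start + t := by omega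
        rw [this]; exact hfree
      obtain ⟨r, heq, hle, hocc, hfr⟩ := ih (start + 1) (by omega) hex'
      refine ⟨r, ?_, by omega, ?_, hfr⟩
      · simp only [pvBLoop, hc, if_true]; exact heq
      · intro j hj1 hj2
        by_cases hj : j = start
        · subst hj; exact hmem
        · exact hocc j (by omega) hj2
    · refine ⟨start, ?_, le_refl _, by omega, ?_⟩
      · simp only [pvBLoop, hc]; simp
      · intro hmem
        exact hc (by simpa [PySem.Set.contains] using hmem)

-- the simulation invariant between A's counter dict and B's set of used names
def pvInv (cc : PySem.Dict String Int) (used : PySem.Set String) : Prop :=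
  cc.keys = used ∧ cc.keys.Nodup ∧
  ∀ m v, cc.get? m = some v → 1 ≤ v ∧ ∀ j : Int, 1 ≤ j → j < v → pvCand m j ∈ cc.keys

lemma pvSet_mem (s : PySem.Set String) (x : String) : s.contains x = true ↔ x ∈ s := by
  simp [PySem.Set.contains]

lemma pvStep_rel (cc : PySem.Dict String Int) (used : PySem.Set String) (ans : List String)
    (nm : String) (hinv : pvInv cc used) :
    pvInv (pvAStep (cc, ans) nm).1 (pvBStep (used, ans) nm).1 ∧
    (pvAStep (cc, ans) nm).2 = (pvBStep (used, ans) nm).2 := by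
  obtain ⟨hkeys, hnd, hval⟩ := hinv
  by_cases hc : cc.contains nm = true
  · -- collision branch in both programs
    have hmemkeys : nm ∈ cc.keys := (PySem.Dict.contains_iff_mem_keys _ _).1 hc
    have hcu : used.contains nm = true := (pvSet_mem used nm).2 (hkeys ▸ hmemkeys)
    have hsome : (cc.get? nm).isSome := by
      rw [← PySem.Dict.contains_eq_isSome_get?]; exact hc
    obtain ⟨uid0, hget⟩ := Option.isSome_iff_exists.1 hsome
    have hgetD : cc.getD nm 0 = uid0 := by
      rw [PySem.Dict.getD_eq_get?_getD, hget]; rfl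
    obtain ⟨h1uid, hbelow⟩ := hval nm uid0 hget
    have hexA : ∃ t : Nat, t < cc.keys.length + 1 ∧ pvCand nm (uid0 + t) ∉ cc.keys :=
      pvExists_free cc.keys nm uid0 h1uid
    obtain ⟨rA, heqA, hleA, hoccA, hfrA⟩ :=
      pvALoop_spec cc nm (cc.keys.length + 1) uid0 h1uid hexA
    have hexB : ∃ t : Nat, t < used.length + 1 ∧ pvCand nm (1 + t) ∉ used := by
      have h := pvExists_free cc.keys nm 1 (le_refl 1)
      rw [hkeys] at h; exact h
    obtain ⟨rB, heqB, hleB, hoccB, hfrB⟩ :=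
      pvBLoop_spec used nm (used.length + 1) 1 (le_refl 1) hexB
    -- the two loops find the same first free index
    have hsame : rA = rB := by
      rw [← hkeys] at hfrB hoccB
      rcases lt_trichotomy rA rB with hlt | he | hlt
      · exact absurd (hoccB rA (by omega) hlt) hfrA
      · exact he
      · exfalso
        by_cases hge : uid0 ≤ rB
        · exact hfrB (hoccA rB hge hlt)
        · exact hfrB (hbelow rB hleB (by omega))
    subst hsame
    have stepA : pvAStep (cc, ans) nm =
        ((cc.insert (pvCand nm rA) 1).insert nm (rA + 1), ans ++ [pvCand nm rA]) := by
      simp only [pvAStep]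
      have hne : ¬ cc.contains nm = false := by rw [hc]; simp
      rw [if_neg hne, hgetD, heqA]
    have stepB : pvBStep (used, ans) nm =
        (used.add (pvCand nm rA), ans ++ [pvCand nm rA]) := by
      simp only [pvBStep]
      have hne : ¬ used.contains nm = false := by rw [hcu]; simp
      rw [if_neg hne, heqB]
    rw [stepA, stepB]
    have hxne : nm ≠ pvCand nm rA := by
      intro h; rw [← h] at hfrA; exact hfrA hmemkeys
    have hcontx : cc.contains (pvCand nm rA) = false := by
      rcases h : cc.contains (pvCand nm rA) with _ | _
      · rfl
      · exact absurd ((PySem.Dict.contains_iff_mem_keys _ _).1 h) hfrA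
    have hkeys1 : (cc.insert (pvCand nm rA) 1).keys = cc.keys ++ [pvCand nm rA] :=
      PySem.Dict.keys_insert_of_not_contains _ _ hcontx
    have hcont2 : (cc.insert (pvCand nm rA) 1).contains nm = true := by
      rw [PySem.Dict.contains_insert, hc]; simp
    have hkeys2 : ((cc.insert (pvCand nm rA) 1).insert nm (rA + 1)).keys =
        cc.keys ++ [pvCand nm rA] := by
      rw [PySem.Dict.keys_insert_of_contains _ _ hcont2, hkeys1]
    have hfrAU : pvCand nm rA ∉ used := by rw [← hkeys]; exact hfrA
    have haddB : used.add (pvCand nm rA) = used ++ [pvCand nm rA] := by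
      simp [PySem.Set.add, hfrAU]
    refine ⟨⟨by rw [hkeys2, haddB, hkeys], ?_, ?_⟩, rfl⟩
    · rw [hkeys2]
      refine List.Nodup.append hnd (List.nodup_singleton _) ?_
      intro a ha hb
      rw [List.mem_singleton] at hb
      subst hb
      exact hfrA ha
    · intro m v hm
      rw [PySem.Dict.get?_insert] at hm
      by_cases hmn : m = nm
      · subst hmn
        rw [if_pos rfl] at hm
        injection hm with hv
        subst hv
        refine ⟨by omega, ?_⟩
        intro j hj1 hj2
        rw [hkeys2]
        by_cases hje : j = rA
        · subst hje; simp
        · by_cases hjlo : j < uid0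
          · exact List.mem_append_left _ (hbelow j hj1 hjlo)
          · exact List.mem_append_left _ (hoccA j (by omega) (by omega))
      · rw [if_neg hmn, PySem.Dict.get?_insert] at hm
        by_cases hmx : m = pvCand nm rA
        · subst hmx
          rw [if_pos rfl] at hm
          injection hm with hv
          subst hv
          exact ⟨le_refl 1, fun j hj1 hj2 => by omega⟩
        · rw [if_neg hmx] at hm
          obtain ⟨hv1, hvj⟩ := hval m v hm
          refine ⟨hv1, fun j hj1 hj2 => ?_⟩
          rw [hkeys2]
          exact List.mem_append_left _ (hvj j hj1 hj2)
  · -- fresh-name branch in both programs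
    have hc' : cc.contains nm = false := by simpa using hc
    have hnotmem : nm ∉ cc.keys := fun h => hc ((PySem.Dict.contains_iff_mem_keys _ _).2 h)
    have hnotmemU : nm ∉ used := by rw [← hkeys]; exact hnotmem
    have hcu : used.contains nm = false := by
      rcases h : used.contains nm with _ | _
      · rfl
      · exact absurd ((pvSet_mem used nm).1 h) hnotmemU
    have stepA : pvAStep (cc, ans) nm = (cc.insert nm (cc.getD nm 0 + 1), ans ++ [nm]) := by
      simp only [pvAStep]
      rw [if_pos hc']
    have stepB : pvBStep (used, ans) nm = (used.add nm, ans ++ [nm]) := by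
      simp only [pvBStep]
      rw [if_pos hcu]

    rw [stepA, stepB]
    have hkeys1 : (cc.insert nm (cc.getD nm 0 + 1)).keys = cc.keys ++ [nm] :=
      PySem.Dict.keys_insert_of_not_contains _ _ hc'
    have haddB : used.add nm = used ++ [nm] := by
      simp [PySem.Set.add, hnotmemU]
    refine ⟨⟨by rw [hkeys1, haddB, hkeys], ?_, ?_⟩, rfl⟩
    · rw [hkeys1]
      refine List.Nodup.append hnd (List.nodup_singleton _) ?_
      intro a ha hb
      rw [List.mem_singleton] at hb
      subst hb
      exact hnotmem ha
    · intro m v hm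
      rw [PySem.Dict.get?_insert] at hm
      by_cases hmn : m = nm
      · subst hmn
        rw [if_pos rfl] at hm
        injection hm with hv
        rw [PySem.Dict.getD_of_not_contains _ _ hc'] at hv
        subst hv
        exact ⟨by omega, fun j hj1 hj2 => by omega⟩
      · rw [if_neg hmn] at hm
        obtain ⟨hv1, hvj⟩ := hval m v hm
        refine ⟨hv1, fun j hj1 hj2 => ?_⟩
        rw [hkeys1]
        exact List.mem_append_left _ (hvj j hj1 hj2)

lemma pvFold_rel (names : List String) :
    ∀ (cc : PySem.Dict String Int) (used : PySem.Set String) (ans : List String),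
    pvInv cc used →
    (names.foldl pvAStep (cc, ans)).2 = (names.foldl pvBStep (used, ans)).2 := by
  induction names with
  | nil => intro cc used ans _; rfl
  | cons nm rest ih =>
    intro cc used ans hinv
    obtain ⟨hinv', hans⟩ := pvStep_rel cc used ans nm hinv
    simp only [List.foldl_cons]
    have hA : pvAStep (cc, ans) nm = ((pvAStep (cc, ans) nm).1, (pvAStep (cc, ans) nm).2) := rfl
    have hB : pvBStep (used, ans) nm = ((pvBStep (used, ans) nm).1, (pvBStep (used, ans) nm).2) := rfl
    rw [hA, hB, hans]
    exact ih _ _ _ hinv'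

lemma pvInv_init : pvInv PySem.Dict.empty PySem.Set.empty := by
  refine ⟨rfl, List.nodup_nil, ?_⟩
  intro m v hm
  simp [PySem.Dict.get?_empty] at hm

-- ===== VERDICT (by name: the statement is the Claim_ definition above) =====
theorem getFolderNames_spec : Claim_equal_getFolderNames := by
  intro names _
  unfold Spec_getFolderNames getFolderNames getFolderNames_alt
  exact pvFold_rel names PySem.Dict.empty PySem.Set.empty [] pvInv_init
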